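-- pv_equiv track=rewrite | github.com/iridescent99/codeforces | 1100/2063B.py | best_with_side
-- ===== SOURCE A (Python) =====
-- def best_with_side(seg, outside):
--     seg_sorted = sorted(seg, reverse=True)
--     out_sorted = sorted(outside)
--
--     base = sum(seg_sorted)
--     best = base
--
--     kmax = min(len(seg_sorted), len(out_sorted))
--     cur = base
--     for k in range(kmax):
--         cur = cur - seg_sorted[k] + out_sorted[k]
--         if cur < best:
--             best = cur
--     return best
-- ===== SOURCE B (Python) =====
-- def best_with_side(seg, outside):
--     # deltas out_sorted[k]-seg_sorted[k] are non-decreasing, so the best prefix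
--     # swap is exactly the set of negative deltas: no running-minimum state.
--     seg_sorted = sorted(seg, reverse=True)
--     out_sorted = sorted(outside)
--     return sum(seg) + sum(min(0, o - s) for s, o in zip(seg_sorted, out_sorted))
-- ===== Notes on version B (the rewrite author's own statement) =====
-- stated objective: simpler
-- what changed: Replaced the running-minimum prefix loop (cur/best state over indices into both sorted lists) by a stateless closed form: base plus the sum of min(0, out_sorted[k]-seg_sorted[k]) over zip, valid because those deltas are non-decreasing.
import Mathlib
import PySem

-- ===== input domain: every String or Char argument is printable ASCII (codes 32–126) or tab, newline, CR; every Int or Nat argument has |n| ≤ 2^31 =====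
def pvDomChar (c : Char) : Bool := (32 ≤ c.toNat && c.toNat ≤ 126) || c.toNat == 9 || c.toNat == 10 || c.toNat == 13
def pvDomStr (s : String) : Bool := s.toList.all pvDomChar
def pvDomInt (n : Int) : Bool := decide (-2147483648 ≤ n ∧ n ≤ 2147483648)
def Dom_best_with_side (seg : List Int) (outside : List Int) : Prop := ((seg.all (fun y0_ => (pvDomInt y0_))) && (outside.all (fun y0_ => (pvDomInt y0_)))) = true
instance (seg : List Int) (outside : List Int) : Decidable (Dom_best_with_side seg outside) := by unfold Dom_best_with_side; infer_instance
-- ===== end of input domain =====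

-- B replaces A's running-minimum loop by base + sum of the negative swap deltas,
-- correct because the deltas out_sorted[k]-seg_sorted[k] are non-decreasing (objective: simpler).

-- ===== PORT A =====
def best_with_side (seg : List Int) (outside : List Int) : Int :=
  let seg_sorted := PySem.List.sorted seg (fun x => x) true
  let out_sorted := PySem.List.sorted outside (fun x => x) false
  let base := seg_sorted.sum
  let kmax := min (PySem.List.len seg_sorted) (PySem.List.len out_sorted)
  let st := (PySem.List.pyRange 0 kmax 1).foldl
    (fun (st : Int × Int) k =>
      let cur := st.1 - PySem.List.pyGetD seg_sorted k 0 + PySem.List.pyGetD out_sorted k 0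
      (cur, if cur < st.2 then cur else st.2))
    (base, base)
  st.2

-- ===== PORT B =====
def best_with_side_alt (seg : List Int) (outside : List Int) : Int :=
  let seg_sorted := PySem.List.sorted seg (fun x => x) true
  let out_sorted := PySem.List.sorted outside (fun x => x) false
  seg.sum + ((seg_sorted.zip out_sorted).map (fun p => min 0 (p.2 - p.1))).sum

-- ===== PRECONDITION & SPEC =====
def Spec_best_with_side (seg : List Int) (outside : List Int) (out : Int) : Prop := out = best_with_side_alt seg outside
instance (seg : List Int) (outside : List Int) (out : Int) : Decidable (Spec_best_with_side seg outside out) := by unfold Spec_best_with_side; infer_instance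

-- ===== CLAIM (what is proved, stated in full; the proofs are below) =====
def Claim_equal_best_with_side : Prop := ∀ (seg : List Int) (outside : List Int), Dom_best_with_side seg outside → Spec_best_with_side seg outside (best_with_side seg outside)

-- ===== LEMMAS AND PROOFS =====

-- sum of min(0,·) over any list is ≤ 0
lemma pv_sumNeg_nonpos (ds : List Int) : (ds.map (fun d => min 0 d)).sum ≤ 0 := by
  induction ds with
  | nil => simp
  | cons d rest ih => simp only [List.map_cons, List.sum_cons]; omega

-- sum of min(0,·) over a list of nonnegatives is 0
lemma pv_sumNeg_zero (ds : List Int) (h : ∀ d ∈ ds, 0 ≤ d) : (ds.map (fun d => min 0 d)).sum = 0 := by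
  induction ds with
  | nil => simp
  | cons d rest ih =>
    have h1 := h d (by simp)
    have := ih (fun x hx => h x (by simp [hx]))
    simp only [List.map_cons, List.sum_cons]; omega

-- A's running-minimum fold over a non-decreasing delta list equals min best (cur + Σ min(0,d))
lemma pv_core : ∀ (ds : List Int), ds.Pairwise (· ≤ ·) → ∀ cur best : Int, best ≤ cur →
    (ds.foldl (fun st d => (st.1 + d, if st.1 + d < st.2 then st.1 + d else st.2)) (cur, best)).2
      = min best (cur + (ds.map (fun d => min 0 d)).sum) := by
  intro ds
  induction ds with
  | nil => intro _ cur best h; simp; omega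
  | cons d rest ih =>
    intro hp cur best h
    have hhead := (List.pairwise_cons.mp hp).1
    have hchain := (List.pairwise_cons.mp hp).2
    have hstep : (Prod.snd (if cur + d < best then cur + d else best, if cur + d < best then cur + d else best) : Int) ≤ cur + d := by
      split <;> omega
    simp only [List.foldl_cons]
    have hb' : (if cur + d < best then cur + d else best) ≤ cur + d := by split <;> omega
    rw [ih hchain (cur + d) (if cur + d < best then cur + d else best) hb']
    have hSle := pv_sumNeg_nonpos rest
    by_cases hd : 0 ≤ d
    · have hz := pv_sumNeg_zero rest (fun x hx => le_trans hd (hhead x hx))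
      simp only [List.map_cons, List.sum_cons]
      split <;> omega
    · simp only [List.map_cons, List.sum_cons]
      split <;> omega

-- pairwise monotone deltas from the two sorted lists
lemma pv_deltas_chain (seg outside : List Int) :
    (((PySem.List.sorted seg (fun x => x) true).zip (PySem.List.sorted outside (fun x => x) false)).map
      (fun p => p.2 - p.1)).Pairwise (· ≤ ·) := by
  set ss := PySem.List.sorted seg (fun x => x) true with hss
  set os := PySem.List.sorted outside (fun x => x) false with hos
  have hsrev : ss.Pairwise (fun a b => b ≤ a) := PySem.List.sorted_pairwise_rev seg (fun x => x)
  have hoasc : os.Pairwise (fun a b => a ≤ b) := PySem.List.sorted_pairwise outside (fun x => x)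
  rw [List.pairwise_iff_getElem] at hsrev hoasc ⊢
  intro i j hi hj hij
  simp only [List.length_map, List.length_zip] at hi hj
  have hi1 : i < ss.length := lt_of_lt_of_le hi (min_le_left _ _)
  have hi2 : i < os.length := lt_of_lt_of_le hi (min_le_right _ _)
  have hj1 : j < ss.length := lt_of_lt_of_le hj (min_le_left _ _)
  have hj2 : j < os.length := lt_of_lt_of_le hj (min_le_right _ _)
  have h1 := hsrev i j hi1 hj1 hij
  have h2 := hoasc i j hi2 hj2 hij
  simp only [List.getElem_map, List.getElem_zip]
  omega

-- ===== VERDICT (by name: the statement is the Claim_ definition above) =====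
theorem best_with_side_spec : Claim_equal_best_with_side := by
  intro seg outside _
  unfold Spec_best_with_side best_with_side best_with_side_alt
  simp only []
  set ss := PySem.List.sorted seg (fun x => x) true with hss
  set os := PySem.List.sorted outside (fun x => x) false with hos
  set ds := (ss.zip os).map (fun p => p.2 - p.1) with hds
  have hlen : (ds.length : Int) = min (PySem.List.len ss) (PySem.List.len os) := by
    simp [hds, List.length_zip]
  -- rewrite A's indexed loop as a fold over ds
  have hfold :
      (PySem.List.pyRange 0 (min (PySem.List.len ss) (PySem.List.len os)) 1).foldl
        (fun (st : Int × Int) k =>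
          (st.1 - PySem.List.pyGetD ss k 0 + PySem.List.pyGetD os k 0,
           if st.1 - PySem.List.pyGetD ss k 0 + PySem.List.pyGetD os k 0 < st.2
           then st.1 - PySem.List.pyGetD ss k 0 + PySem.List.pyGetD os k 0 else st.2))
        (ss.sum, ss.sum)
      = ds.foldl (fun st d => (st.1 + d, if st.1 + d < st.2 then st.1 + d else st.2)) (ss.sum, ss.sum) := by
    rw [← hlen]
    rw [PySem.List.foldl_congr_mem (g := fun (st : Int × Int) k =>
          (st.1 + PySem.List.pyGetD ds k 0,
           if st.1 + PySem.List.pyGetD ds k 0 < st.2 then st.1 + PySem.List.pyGetD ds k 0 else st.2))]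
    · exact PySem.List.foldl_pyRange_zero_pyGetD' ds 0
        (fun st d => (st.1 + d, if st.1 + d < st.2 then st.1 + d else st.2)) (ss.sum, ss.sum)
    · intro acc k hk
      rw [PySem.List.mem_pyRange_one] at hk
      have h0 : 0 ≤ k := hk.1
      have hkd : k < (ds.length : Int) := hk.2
      have hk1 : k.toNat < ds.length := by omega
      have hget : PySem.List.pyGetD ds k 0 = PySem.List.pyGetD os k 0 - PySem.List.pyGetD ss k 0 := by
        have hlz : ds.length = min ss.length os.length := by
          simp [hds, List.length_zip]
        have hk2 : k.toNat < ss.length := by omega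
        have hk3 : k.toNat < os.length := by omega
        rw [PySem.List.pyGetD_eq_getElem ds 0 h0 (by exact_mod_cast hkd),
            PySem.List.pyGetD_eq_getElem os 0 h0 (by omega),
            PySem.List.pyGetD_eq_getElem ss 0 h0 (by omega)]
        simp [hds]
      rw [hget]; ring_nf
  rw [hfold, pv_core ds (by rw [hds]; exact pv_deltas_chain seg outside) ss.sum ss.sum le_rfl]
  have hsum : ss.sum = seg.sum := (PySem.List.sorted_perm seg (fun x => x) true).sum_eq
  have hmap : (ds.map (fun d => min 0 d)) = (ss.zip os).map (fun p => min 0 (p.2 - p.1)) := by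
    simp [hds, List.map_map, Function.comp]
  have hle := pv_sumNeg_nonpos ds
  rw [hmap] at hle ⊢
  rw [hsum]
  omega
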